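-- pv_equiv track=rewrite | github.com/wasd314/consecutive-power-sum | power/sol3_py/main.py | solve_e
-- ===== SOURCE A (Python) =====
-- def solve_e(n: int, e: int):
--     if n < 1 + 2**e:
--         return []
--     power = []
--     for i in range(n + 1):
--         if i**e <= n:
--             power.append(i**e)
--         else:
--             break
--     # power[i] = i**e
--
--     c = len(power)
--     acc = [0] * (c + 1)
--     for i in range(c):
--         acc[i + 1] = acc[i] + power[i]
--     # acc[i] = sum(j**e for j < i)
--     # acc[i + 1] = sum(j**e for j <= i)
--
--     right = {acc[i + 1]: i for i in range(1, c)}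
--     ans = []
--     for l in range(1, c + 1):
--         r = right.get(acc[l] + n, -1)
--         if r != -1:
--             ans.append((e, l, r))
--     return ans
-- ===== SOURCE B (Python) =====
-- def solve_e(n, e):
--     if n < 1 + 2**e:
--         return []
--     power = []
--     for i in range(n + 1):
--         p = i**e
--         if p <= n:
--             power.append(p)
--         else:
--             break
--     c = len(power)
--     ans = []
--     left = 1
--     window = 0  # sum(power[left:right+1]) maintained below
--     for right in range(1, c):
--         window += power[right]
--         while window > n:
--             window -= power[left]
--             left += 1
--         if window == n:
--             ans.append((e, left, right))
--     return ans
-- ===== Notes on version B (the rewrite author's own statement) =====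
-- stated objective: alternative
-- what changed: Replaces the prefix-sum array plus hash index (dict acc-sum -> right endpoint, then a lookup per left endpoint) with a two-pointer sliding window over the power list that maintains a running window sum.
import Mathlib
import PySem

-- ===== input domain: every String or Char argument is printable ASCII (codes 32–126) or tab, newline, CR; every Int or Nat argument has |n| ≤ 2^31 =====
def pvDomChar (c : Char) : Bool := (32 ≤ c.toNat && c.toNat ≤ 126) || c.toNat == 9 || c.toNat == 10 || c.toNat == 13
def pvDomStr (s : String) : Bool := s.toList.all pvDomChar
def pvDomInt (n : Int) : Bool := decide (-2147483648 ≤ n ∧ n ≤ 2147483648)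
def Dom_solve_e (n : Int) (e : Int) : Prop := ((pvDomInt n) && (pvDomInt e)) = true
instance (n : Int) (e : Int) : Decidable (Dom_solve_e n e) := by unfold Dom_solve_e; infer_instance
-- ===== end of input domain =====

-- B replaces A's prefix-sum array + dict index with a two-pointer sliding window (alternative algorithm, same asymptotics).

-- ===== PORT A =====
-- shared helper: the guard 'n < 1 + 2**e'.  Exact for 0 ≤ e; for e < 0 Python's 2**e is a
-- float in (0, 1/2], so for an integer n the comparison holds iff n ≤ 1.
def pvGuard (n : Int) (e : Int) : Bool := if 0 ≤ e then n < 1 + 2 ^ e.toNat else n ≤ 1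
-- shared helper: 'for i in range(n+1): if i**e <= n: power.append(i**e) else: break'
-- (fuel = the n+1 iterations of the range; the appends are accumulated tail-recursively and
--  reversed on exit; i**e ported as i ^ e.toNat, exact for 0 ≤ e — for e < 0 past the guard
--  Python raises ZeroDivisionError at i = 0, excluded by Pre_solve_e)
def pvPowerLoop (n : Int) (e : Int) : Nat → Int → List Int → List Int
  | 0, _, out => out.reverse
  | fuel + 1, i, out => if i ^ e.toNat ≤ n then pvPowerLoop n e fuel (i + 1) (i ^ e.toNat :: out) else out.reverse

-- shared helper: Python lists are arrays, and every index used below is nonnegative and in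
-- range, where xs[i] is exactly this O(1) array read
def pvIx (a : Array Int) (i : Int) : Int := a.getD i.toNat 0

def solve_e (n : Int) (e : Int) : List (Int × Int × Int) :=
  if pvGuard n e then []
  else
    let power := pvPowerLoop n e (n + 1).toNat 0 []
    let c : Int := power.length
    -- 'acc = [0]*(c+1); acc[i+1] = acc[i] + power[i]' fills positions 1..c in order, each read
    -- acc[i] being the value just written: ported as the same running prefix-sum recurrence,
    -- accumulated in reverse and reversed at the end
    let pa := power.toArray
    let acc := ((PySem.List.pyRange 0 c 1).foldl
      (fun (st : List Int × Int) i =>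
        let v := st.2 + pvIx pa i
        (v :: st.1, v)) ([0], 0)).1.reverse
    let aa := acc.toArray
    -- Python's dict is a hash map, used here only via .get with default -1: ported as Std.HashMap
    let right := (PySem.List.pyRange 1 c 1).foldl
      (fun d i => d.insert (pvIx aa (i + 1)) i) (∅ : Std.HashMap Int Int)
    (PySem.List.pyRange 1 (c + 1) 1).foldl
      (fun ans l =>
        let r := right.getD (pvIx aa l + n) (-1)
        if r ≠ -1 then ans ++ [(e, l, r)] else ans) []

-- ===== PORT B =====
-- 'while window > n: window -= power[left]; left += 1'.  The loop runs at most c iterations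
-- (the window is empty once left passes right), so fuel = c = power.length suffices.
def pvShrink (n : Int) (pa : Array Int) : Nat → Int × Int → Int × Int
  | 0, s => s
  | fuel + 1, (left, window) =>
    if n < window then
      pvShrink n pa fuel (left + 1, window - pvIx pa left)
    else (left, window)

def solve_e_alt (n : Int) (e : Int) : List (Int × Int × Int) :=
  if pvGuard n e then []
  else
    let power := pvPowerLoop n e (n + 1).toNat 0 []
    let c : Int := power.length
    let pa := power.toArray
    ((PySem.List.pyRange 1 c 1).foldl
      (fun (s : List (Int × Int × Int) × Int × Int) r =>
        let lw := pvShrink n pa power.length (s.2.1, s.2.2 + pvIx pa r)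
        (if lw.2 = n then s.1 ++ [(e, lw.1, r)] else s.1, lw))
      ([], 1, 0)).1

-- ===== PRECONDITION & SPEC =====
-- Pre_ excludes exactly the inputs where A raises: for e < 0 with n ≥ 2 the loop computes
-- 0**e and Python raises ZeroDivisionError (B raises there too).
def Pre_solve_e (n : Int) (e : Int) : Prop := 0 ≤ e ∨ n ≤ 1
instance (n : Int) (e : Int) : Decidable (Pre_solve_e n e) := by unfold Pre_solve_e; infer_instance
def pvWitness_solve_e : Int × Int := (25, 2)
def Spec_solve_e (n : Int) (e : Int) (out : List (Int × Int × Int)) : Prop := out = solve_e_alt n e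
instance (n : Int) (e : Int) (out : List (Int × Int × Int)) : Decidable (Spec_solve_e n e out) := by unfold Spec_solve_e; infer_instance

-- ===== CLAIM (what is proved, stated in full; the proofs are below) =====
def Claim_equal_solve_e : Prop := ∀ (n : Int) (e : Int), Dom_solve_e n e → Pre_solve_e n e → Spec_solve_e n e (solve_e n e)

-- ===== LEMMAS AND PROOFS =====

-- proof-side abbreviations: i**e and the prefix sums of the power list
def pvPw (e : Int) (j : Nat) : Int := (j : Int) ^ e.toNat

def pvAcc (e : Int) : Nat → Int
  | 0 => 0
  | j + 1 => pvAcc e j + pvPw e j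

lemma pvPw_nonneg (e : Int) (j : Nat) : 0 ≤ pvPw e j := pow_nonneg (Int.natCast_nonneg j) _

lemma pvPw_one_le (e : Int) {j : Nat} (h : 1 ≤ j) : 1 ≤ pvPw e j :=
  one_le_pow₀ (by exact_mod_cast h)

lemma pvAcc_mono (e : Int) {i j : Nat} (h : i ≤ j) : pvAcc e i ≤ pvAcc e j := by
  induction j with
  | zero =>
    have : i = 0 := by omega
    subst this; rfl
  | succ j ih =>
    rcases Nat.lt_or_ge i (j+1) with h' | h'
    · have := ih (by omega)
      have := pvPw_nonneg e j
      show pvAcc e i ≤ pvAcc e j + pvPw e j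
      omega
    · have : i = j + 1 := by omega
      subst this; rfl

lemma pvAcc_strict (e : Int) {i j : Nat} (h1 : 1 ≤ i) (h2 : i < j) : pvAcc e i < pvAcc e j := by
  have hle : pvAcc e (i+1) ≤ pvAcc e j := pvAcc_mono e h2
  have h1' : 1 ≤ pvPw e i := pvPw_one_le e h1
  have : pvAcc e (i+1) = pvAcc e i + pvPw e i := rfl
  omega

lemma pvAcc_lt_reflect (e : Int) {i j : Nat} (h : pvAcc e i < pvAcc e j) : i < j := by
  by_contra h'
  exact absurd (pvAcc_mono e (by omega : j ≤ i)) (by omega)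

-- the power-building loop yields consecutive powers
lemma pvPowerLoop_shape (n e : Int) :
    ∀ (f : Nat) (i : Nat) (out : List Int), ∃ m,
      pvPowerLoop n e f (i : Int) out = out.reverse ++ (List.range' i m).map (pvPw e)
      ∧ (m < f → n < pvPw e (i + m)) := by
  intro f
  induction f with
  | zero => intro i out; exact ⟨0, by simp [pvPowerLoop], by omega⟩
  | succ f ih =>
    intro i out
    by_cases h : (i : Int) ^ e.toNat ≤ n
    · obtain ⟨m, hm, hb⟩ := ih (i + 1) ((i : Int) ^ e.toNat :: out)
      refine ⟨m + 1, ?_, ?_⟩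
      · have hcast : ((i : Int) + 1) = ((i + 1 : Nat) : Int) := by push_cast; ring
        simp only [pvPowerLoop, if_pos h]
        rw [hcast, hm, List.range'_succ, List.map_cons, List.reverse_cons, List.append_assoc]
        rfl
      · intro hlt
        have := hb (by omega)
        have harith : i + 1 + m = i + (m + 1) := by omega
        rwa [harith] at this
    · refine ⟨0, by simp [pvPowerLoop, h], ?_⟩
      intro _
      simpa [pvPw] using lt_of_not_ge h

-- the acc-building loop (Nat form)
-- the index bridge: an in-range read of the array view of a mapped range
lemma pvIx_map_range (f : Nat → Int) (cN : Nat) (x : Int) (h0 : 0 ≤ x) (h1 : x < (cN : Int)) :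
    pvIx ((List.range cN).map f).toArray x = f x.toNat := by
  unfold pvIx
  rw [Array.getD]
  split
  · rename_i h
    simp only [Array.getInternal_eq_getElem, List.getElem_toArray, List.getElem_map,
      List.getElem_range]
  · rename_i h
    simp only [List.size_toArray, List.length_map, List.length_range, not_lt] at h
    omega

-- the prefix-sum loop (Nat form)
lemma acc_pair_foldl (e : Int) (cN : Nat) :
    ∀ k, k ≤ cN →
      (List.range k).foldl
        (fun (st : List Int × Int) iN => ((st.2 + pvPw e iN) :: st.1, st.2 + pvPw e iN))
        ([0], 0)
      = (((List.range (k + 1)).map (pvAcc e)).reverse, pvAcc e k) := by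
  intro k
  induction k with
  | zero =>
    intro _
    simp [pvAcc]
  | succ k ih =>
    intro hk
    rw [List.range_succ, List.foldl_append, ih (by omega), List.foldl_cons, List.foldl_nil]
    have hv : pvAcc e k + pvPw e k = pvAcc e (k + 1) := rfl
    rw [hv, List.range_succ (n := k + 1), List.map_append, List.reverse_append]
    rfl

lemma foldl_filterMap {α β : Type} (g : α → Option β) (xs : List α) (acc : List β) :
    xs.foldl (fun ans x => ans ++ (g x).toList) acc = acc ++ xs.filterMap g := by
  induction xs generalizing acc with
  | nil => simp
  | cons x xs ih =>
    simp only [List.foldl_cons, List.filterMap_cons]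
    cases hx : g x with
    | none => simp [ih]
    | some y => simp [ih]

-- the match set: (e, l, r) with 1 ≤ l ≤ r, r + 1 ≤ c and power-sum l..r equal to n
def pvChar (e n : Int) (cN : Nat) (x : Int × Int × Int) : Prop :=
  ∃ L R : Nat, x = (e, (L : Int), (R : Int)) ∧ 1 ≤ L ∧ L ≤ R ∧ R + 1 ≤ cN ∧
    pvAcc e (R + 1) = pvAcc e L + n
-- the while-loop: pvShrink stops at the least left whose window sum is ≤ n
lemma pvShrink_spec (n e : Int) (hn : 1 ≤ n) (cN : Nat) :
    ∀ (fuel L R : Nat), 1 ≤ L → L ≤ R → R ≤ cN → R - L ≤ fuel →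
      ∃ Ls : Nat,
        pvShrink n ((List.range cN).map (pvPw e)).toArray fuel ((L : Int), pvAcc e R - pvAcc e L)
          = ((Ls : Int), pvAcc e R - pvAcc e Ls)
        ∧ L ≤ Ls ∧ Ls ≤ R ∧ pvAcc e R - pvAcc e Ls ≤ n
        ∧ ∀ l', L ≤ l' → l' < Ls → n < pvAcc e R - pvAcc e l' := by
  intro fuel
  induction fuel with
  | zero =>
    intro L R h1 h2 h3 h4
    have : L = R := by omega
    subst this
    exact ⟨L, rfl, le_rfl, le_rfl, by omega, by omega⟩
  | succ fuel ih =>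
    intro L R h1 h2 h3 h4
    by_cases hw : n < pvAcc e R - pvAcc e L
    · have hLR : L < R := by
        rcases Nat.lt_or_ge L R with h | h
        · exact h
        · have : L = R := by omega
          subst this; omega
      have hget : pvIx ((List.range cN).map (pvPw e)).toArray ((L : Int)) = pvPw e L := by
        rw [pvIx_map_range _ _ _ (by omega) (by omega : ((L : Nat) : Int) < (cN : Int))]
        simp
      have hstep : pvShrink n ((List.range cN).map (pvPw e)).toArray (fuel + 1) ((L : Int), pvAcc e R - pvAcc e L)
          = pvShrink n ((List.range cN).map (pvPw e)).toArray fuel (((L + 1 : Nat) : Int), pvAcc e R - pvAcc e (L + 1)) := by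
        show (if n < pvAcc e R - pvAcc e L then _ else _) = _
        rw [if_pos hw, hget]
        have h5 : ((L : Int)) + 1 = ((L + 1 : Nat) : Int) := by push_cast; ring
        have h6 : pvAcc e R - pvAcc e L - pvPw e L = pvAcc e R - pvAcc e (L + 1) := by
          have : pvAcc e (L + 1) = pvAcc e L + pvPw e L := rfl
          omega
        rw [h5, h6]
      obtain ⟨Ls, hres, hl1, hl2, hl3, hl4⟩ := ih (L + 1) R (by omega) (by omega) h3 (by omega)
      refine ⟨Ls, hstep.trans hres, by omega, hl2, hl3, ?_⟩
      intro l' hl' hls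
      rcases Nat.lt_or_ge l' (L + 1) with h | h
      · have : l' = L := by omega
        subst this; exact hw
      · exact hl4 l' h hls
    · refine ⟨L, ?_, le_rfl, h2, by omega, by omega⟩
      show (if n < pvAcc e R - pvAcc e L then _ else _) = _
      rw [if_neg hw]

-- B's loop body after the range rewrite (indices k ↦ r = 1 + k)
def pvBStep (n e : Int) (cN : Nat) (s : List (Int × Int × Int) × Int × Int) (kk : Nat) :
    List (Int × Int × Int) × Int × Int :=
  let lw := pvShrink n ((List.range cN).map (pvPw e)).toArray cN
    (s.2.1, s.2.2 + pvIx ((List.range cN).map (pvPw e)).toArray (1 + (kk : Int)))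
  (if lw.2 = n then s.1 ++ [(e, lw.1, 1 + (kk : Int))] else s.1, lw)

-- matches with right endpoint ≤ k
def pvCharK (e n : Int) (k : Nat) (x : Int × Int × Int) : Prop :=
  ∃ L R : Nat, x = (e, (L : Int), (R : Int)) ∧ 1 ≤ L ∧ L ≤ R ∧ R ≤ k ∧
    pvAcc e (R + 1) = pvAcc e L + n

-- the sliding-window loop invariant
lemma bloop (n e : Int) (hn : 1 ≤ n) (cN : Nat) :
    ∀ (k : Nat), k + 1 ≤ cN →
      ∃ (ans : List (Int × Int × Int)) (L : Nat),
        (List.range k).foldl (pvBStep n e cN) ([], 1, 0)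
          = (ans, (L : Int), pvAcc e (k + 1) - pvAcc e L)
        ∧ 1 ≤ L ∧ L ≤ k + 1 ∧ pvAcc e (k + 1) - pvAcc e L ≤ n
        ∧ (∀ L' : Nat, 1 ≤ L' → L' < L → n < pvAcc e (k + 1) - pvAcc e L')
        ∧ (∀ x, x ∈ ans ↔ pvCharK e n k x)
        ∧ ans.Pairwise (fun a b => a.2.1 < b.2.1) := by
  intro k
  induction k with
  | zero =>
    intro _
    refine ⟨[], 1, by norm_num, le_rfl, by omega, by norm_num; omega, by omega, ?_, by simp⟩
    intro x
    simp only [List.not_mem_nil, false_iff]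
    rintro ⟨L, R, _, hL, hLR, hR, _⟩
    omega
  | succ k ih =>
    intro hk
    obtain ⟨ans, L, hfold, hL1, hL2, hwle, hmin, hmem, hpw⟩ := ih (by omega)
    rw [List.range_succ, List.foldl_append, hfold, List.foldl_cons, List.foldl_nil]
    -- the new element of the window
    have hget : pvIx ((List.range cN).map (pvPw e)).toArray (1 + ((k : Nat) : Int)) = pvPw e (k + 1) := by
      rw [pvIx_map_range _ _ _ (by omega) (by omega : (1 : Int) + ((k : Nat) : Int) < (cN : Int))]
      congr 1
      omega
    have hwin : pvAcc e (k + 1) - pvAcc e L + pvPw e (k + 1) = pvAcc e (k + 1 + 1) - pvAcc e L := by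
      have : pvAcc e (k + 1 + 1) = pvAcc e (k + 1) + pvPw e (k + 1) := rfl
      omega
    obtain ⟨Ls, hres, hls1, hls2, hls3, hls4⟩ :=
      pvShrink_spec n e hn cN cN L (k + 1 + 1) hL1 (by omega) hk (by omega)
    have hstep : pvBStep n e cN (ans, (L : Int), pvAcc e (k + 1) - pvAcc e L) k
        = (if pvAcc e (k + 1 + 1) - pvAcc e Ls = n
            then ans ++ [(e, (Ls : Int), 1 + (k : Int))] else ans,
           (Ls : Int), pvAcc e (k + 1 + 1) - pvAcc e Ls) := by
      show (if _ = n then _ else _, _) = _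
      rw [hget]
      show (if (pvShrink n _ cN (((L:Nat) : Int), pvAcc e (k + 1) - pvAcc e L + pvPw e (k+1))).2 = n then _ else _,
            pvShrink n _ cN (((L:Nat) : Int), pvAcc e (k + 1) - pvAcc e L + pvPw e (k+1))) = _
      rw [hwin, hres]
    rw [hstep]
    -- new left bound and minimality
    have hLs1 : 1 ≤ Ls := le_trans hL1 hls1
    have hmin' : ∀ L' : Nat, 1 ≤ L' → L' < Ls → n < pvAcc e (k + 1 + 1) - pvAcc e L' := by
      intro L' h1' h2'
      rcases Nat.lt_or_ge L' L with h | h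
      · have h3' := hmin L' h1' h
        have : pvAcc e (k + 1) ≤ pvAcc e (k + 1 + 1) := pvAcc_mono e (by omega)
        omega
      · exact hls4 L' h h2'
    -- a match with right endpoint k+1 forces l = Ls and window = n
    have hforce : ∀ L'' : Nat, 1 ≤ L'' → pvAcc e (k + 1 + 1) = pvAcc e L'' + n →
        L'' = Ls ∧ pvAcc e (k + 1 + 1) - pvAcc e Ls = n := by
      intro L'' h1'' heq
      rcases Nat.lt_trichotomy L'' Ls with h | h | h
      · have := hmin' L'' h1'' h
        omega
      · subst h; omega
      · have := pvAcc_strict e hLs1 h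
        omega
    by_cases hhit : pvAcc e (k + 1 + 1) - pvAcc e Ls = n
    · rw [if_pos hhit]
      have hlsle : Ls ≤ k + 1 := by
        by_contra h
        have : Ls = k + 1 + 1 := by omega
        subst this
        simp at hhit
        omega
      refine ⟨ans ++ [(e, (Ls : Int), 1 + (k : Int))], Ls, rfl, hLs1, by omega, hls3, hmin', ?_, ?_⟩
      · intro x
        simp only [List.mem_append, List.mem_singleton, hmem]
        constructor
        · rintro (⟨L', R', hx, h1, h2, h3, h4⟩ | rfl)
          · exact ⟨L', R', hx, h1, h2, by omega, h4⟩
          · refine ⟨Ls, k + 1, by push_cast; ring_nf, hLs1, hlsle, le_rfl, by omega⟩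
        · rintro ⟨L', R', hx, h1, h2, h3, h4⟩
          rcases Nat.lt_or_ge R' (k + 1) with h | h
          · exact Or.inl ⟨L', R', hx, h1, h2, by omega, h4⟩
          · have hR' : R' = k + 1 := by omega
            subst hR'
            obtain ⟨h5, _⟩ := hforce L' h1 h4
            subst h5
            right
            rw [hx]
            norm_num
            ring
      · rw [List.pairwise_append]
        refine ⟨hpw, List.pairwise_singleton _ _, ?_⟩
        intro a ha b hb
        rw [List.mem_singleton] at hb
        subst hb
        obtain ⟨L', R', hx, h1, h2, h3, h4⟩ := (hmem a).mp ha
        have hltacc : pvAcc e (R' + 1) < pvAcc e (k + 1 + 1) := pvAcc_strict e (by omega) (by omega)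
        have : pvAcc e L' < pvAcc e Ls := by omega
        have hlt : L' < Ls := pvAcc_lt_reflect e this
        rw [hx]
        show (L' : Int) < (Ls : Int)
        exact_mod_cast hlt
    · rw [if_neg hhit]
      refine ⟨ans, Ls, rfl, hLs1, by omega, hls3, hmin', ?_, hpw⟩
      intro x
      rw [hmem]
      constructor
      · rintro ⟨L', R', hx, h1, h2, h3, h4⟩
        exact ⟨L', R', hx, h1, h2, by omega, h4⟩
      · rintro ⟨L', R', hx, h1, h2, h3, h4⟩
        rcases Nat.lt_or_ge R' (k + 1) with h | h
        · exact ⟨L', R', hx, h1, h2, by omega, h4⟩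
        · have hR' : R' = k + 1 := by omega
          subst hR'
          obtain ⟨_, hC⟩ := hforce L' h1 h4
          exact absurd hC hhit
-- the else-branches of the two ports with the power list replaced by its closed form
def pvAexpr (n e : Int) (cN : Nat) : List (Int × Int × Int) :=
  let power := (List.range cN).map (pvPw e)
  let c : Int := power.length
  let pa := power.toArray
  let acc := ((PySem.List.pyRange 0 c 1).foldl
    (fun (st : List Int × Int) i =>
      let v := st.2 + pvIx pa i
      (v :: st.1, v)) ([0], 0)).1.reverse
  let aa := acc.toArray
  let right := (PySem.List.pyRange 1 c 1).foldl
    (fun d i => d.insert (pvIx aa (i + 1)) i) (∅ : Std.HashMap Int Int)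
  (PySem.List.pyRange 1 (c + 1) 1).foldl
    (fun ans l =>
      let r := right.getD (pvIx aa l + n) (-1)
      if r ≠ -1 then ans ++ [(e, l, r)] else ans) []

def pvBexpr (n e : Int) (cN : Nat) : List (Int × Int × Int) :=
  let power := (List.range cN).map (pvPw e)
  let c : Int := power.length
  let pa := power.toArray
  ((PySem.List.pyRange 1 c 1).foldl
    (fun (s : List (Int × Int × Int) × Int × Int) r =>
      let lw := pvShrink n pa power.length (s.2.1, s.2.2 + pvIx pa r)
      (if lw.2 = n then s.1 ++ [(e, lw.1, r)] else s.1, lw))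
    ([], 1, 0)).1

-- the dict-building fold with rewritten keys (hash map, Nat-indexed form)
def pvHMF (e : Int) (M : Nat) : Std.HashMap Int Int :=
  (List.range M).foldl (fun d jN => d.insert (pvAcc e (jN + 2)) ((1 + jN : Nat) : Int)) ∅

lemma pvAcc_key_inj (e : Int) {a b : Nat} (h : pvAcc e (a + 2) = pvAcc e (b + 2)) : a = b := by
  by_contra hne
  rcases Nat.lt_or_ge a b with h' | h'
  · exact absurd h (ne_of_lt (pvAcc_strict e (by omega) (by omega)))
  · exact absurd h.symm (ne_of_lt (pvAcc_strict e (by omega) (by omega)))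

lemma pvHMF_getD_ne (e : Int) :
    ∀ (M : Nat) (t r : Int), (pvHMF e M).getD t (-1) = r → r ≠ -1 →
      ∃ jN : Nat, jN < M ∧ r = ((1 + jN : Nat) : Int) ∧ pvAcc e (jN + 2) = t := by
  intro M
  induction M with
  | zero =>
    intro t r hr hne
    simp [pvHMF] at hr
    omega
  | succ M ih =>
    intro t r hr hne
    rw [pvHMF, List.range_succ, List.foldl_append, List.foldl_cons, List.foldl_nil] at hr
    rw [Std.HashMap.getD_insert] at hr
    by_cases hk : pvAcc e (M + 2) = t
    · rw [if_pos (by simpa using hk)] at hr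
      exact ⟨M, by omega, hr.symm, hk⟩
    · rw [if_neg (by simpa using hk)] at hr
      obtain ⟨jN, h1, h2, h3⟩ := ih t r hr hne
      exact ⟨jN, by omega, h2, h3⟩

lemma pvHMF_getD_hit (e : Int) :
    ∀ (M : Nat) (jN : Nat), jN < M →
      (pvHMF e M).getD (pvAcc e (jN + 2)) (-1) = ((1 + jN : Nat) : Int) := by
  intro M
  induction M with
  | zero => omega
  | succ M ih =>
    intro jN hj
    rw [pvHMF, List.range_succ, List.foldl_append, List.foldl_cons, List.foldl_nil]
    rw [Std.HashMap.getD_insert]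
    by_cases hk : jN = M
    · subst hk
      rw [if_pos (by simp)]
    · have hne : pvAcc e (M + 2) ≠ pvAcc e (jN + 2) := fun h => hk (pvAcc_key_inj e h).symm
      rw [if_neg (by simpa using hne)]
      exact ih jN (by omega)

-- A's answer loop as a filterMap over the left endpoints
def pvGA (n e : Int) (cN : Nat) (l : Int) : Option (Int × Int × Int) :=
  if (pvHMF e (cN - 1)).getD (pvAcc e l.toNat + n) (-1) = -1 then none
  else some (e, l, (pvHMF e (cN - 1)).getD (pvAcc e l.toNat + n) (-1))

lemma pvAexpr_eq (n e : Int) (cN : Nat) :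
    pvAexpr n e cN = (PySem.List.pyRange 1 ((cN : Int) + 1) 1).filterMap (pvGA n e cN) := by
  unfold pvAexpr
  simp only [List.length_map, List.length_range]
  -- the acc value
  have hacc : ((PySem.List.pyRange 0 (cN : Int) 1).foldl
      (fun (st : List Int × Int) i =>
        ((st.2 + pvIx ((List.range cN).map (pvPw e)).toArray i) :: st.1,
         st.2 + pvIx ((List.range cN).map (pvPw e)).toArray i)) ([0], 0)).1.reverse
      = (List.range (cN + 1)).map (pvAcc e) := by
    rw [PySem.List.foldl_congr_mem _ _
      (fun (st : List Int × Int) i => ((st.2 + pvPw e i.toNat) :: st.1, st.2 + pvPw e i.toNat)) _ ?_]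
    · rw [PySem.List.pyRange_zero_natCast, List.foldl_map]
      have hfn : (fun (st : List Int × Int) (k : Nat) =>
          ((st.2 + pvPw e ((k : Int)).toNat) :: st.1, st.2 + pvPw e ((k : Int)).toNat))
          = (fun (st : List Int × Int) (iN : Nat) =>
          ((st.2 + pvPw e iN) :: st.1, st.2 + pvPw e iN)) := by
        funext st k
        rw [Int.toNat_natCast]
      rw [hfn, acc_pair_foldl e cN cN le_rfl]
      simp
    · intro st i hi
      rw [PySem.List.mem_pyRange_one] at hi
      rw [pvIx_map_range _ _ _ (by omega) (by omega)]
  rw [hacc]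
  -- the dict value
  have hdict : (PySem.List.pyRange 1 (cN : Int) 1).foldl
      (fun d i => d.insert (pvIx ((List.range (cN + 1)).map (pvAcc e)).toArray (i + 1)) i)
      (∅ : Std.HashMap Int Int) = pvHMF e (cN - 1) := by
    rw [PySem.List.foldl_congr_mem _ _
      (fun d i => d.insert (pvAcc e (i + 1).toNat) i) _ ?_]
    · rw [PySem.List.pyRange_one 1 (cN : Int), List.foldl_map]
      have ht : ((cN : Int) - 1).toNat = cN - 1 := by omega
      rw [ht]
      have hfn : (fun (d : Std.HashMap Int Int) (jN : Nat) =>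
          d.insert (pvAcc e ((1 + (jN : Int)) + 1).toNat) (1 + (jN : Int)))
          = (fun (d : Std.HashMap Int Int) (jN : Nat) =>
          d.insert (pvAcc e (jN + 2)) ((1 + jN : Nat) : Int)) := by
        funext d jN
        have h1 : ((1 + (jN : Int)) + 1).toNat = jN + 2 := by omega
        have h2 : (1 + (jN : Int)) = ((1 + jN : Nat) : Int) := by push_cast; ring
        rw [h1, h2]
      rw [hfn]
      rfl
    · intro d i hi
      rw [PySem.List.mem_pyRange_one] at hi
      rw [pvIx_map_range _ _ _ (by omega) (by omega)]
  rw [hdict]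
  -- the answer loop
  rw [PySem.List.foldl_congr_mem _ _
    (fun ans l => ans ++ (pvGA n e cN l).toList) _ ?_]
  · rw [foldl_filterMap (pvGA n e cN) (PySem.List.pyRange 1 ((cN : Int) + 1) 1) []]
    simp
  · intro acc l hl
    rw [PySem.List.mem_pyRange_one] at hl
    have haccl : pvIx ((List.range (cN + 1)).map (pvAcc e)).toArray l = pvAcc e l.toNat := by
      rw [pvIx_map_range _ _ _ (by omega) (by omega)]
    rw [haccl]
    unfold pvGA
    dsimp only
    by_cases hr : (pvHMF e (cN - 1)).getD (pvAcc e l.toNat + n) (-1) = -1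
    · rw [if_neg (by simpa using hr), if_pos hr]
      simp
    · rw [if_pos hr, if_neg hr]
      simp

lemma pvAexpr_mem (n e : Int) (hn : 1 ≤ n) (cN : Nat) (x : Int × Int × Int) :
    x ∈ pvAexpr n e cN ↔ pvChar e n cN x := by
  rw [pvAexpr_eq, List.mem_filterMap]
  constructor
  · rintro ⟨l, hl, hx⟩
    rw [PySem.List.mem_pyRange_one] at hl
    unfold pvGA at hx
    by_cases hr : (pvHMF e (cN - 1)).getD (pvAcc e l.toNat + n) (-1) = -1
    · rw [if_pos hr] at hx
      exact absurd hx (by simp)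
    · rw [if_neg hr] at hx
      obtain ⟨jN, h1, h2, h3⟩ := pvHMF_getD_ne e (cN - 1) _ _ rfl hr
      have hLR : l.toNat < jN + 2 := by
        apply pvAcc_lt_reflect e
        have : pvAcc e (jN + 2) = pvAcc e l.toNat + n := h3
        omega
      refine ⟨l.toNat, jN + 1, ?_, by omega, by omega, by omega, by
        have : jN + 1 + 1 = jN + 2 := by omega
        rw [this]; exact h3⟩
      have hx' : x = (e, l, (pvHMF e (cN - 1)).getD (pvAcc e l.toNat + n) (-1)) :=
        (Option.some.inj hx).symm
      rw [hx', h2]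
      have hcl : ((l.toNat : Nat) : Int) = l := by omega
      have hadd : 1 + jN = jN + 1 := by omega
      rw [hadd, hcl]
  · rintro ⟨L, R, hx, h1, h2, h3, h4⟩
    refine ⟨(L : Int), PySem.List.mem_pyRange_one.mpr ⟨by omega, by omega⟩, ?_⟩
    have hjN : R - 1 < cN - 1 := by omega
    have hkey : pvAcc e ((R - 1) + 2) = pvAcc e ((L : Int)).toNat + n := by
      have hR : (R - 1) + 2 = R + 1 := by omega
      have hL : ((L : Int)).toNat = L := by omega
      rw [hR, hL, h4]
    have hhit := pvHMF_getD_hit e (cN - 1) (R - 1) hjN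
    rw [hkey] at hhit
    unfold pvGA
    rw [hhit]
    have hv : ((1 + (R - 1) : Nat) : Int) = ((R : Nat) : Int) := by
      have : 1 + (R - 1) = R := by omega
      rw [this]
    rw [hv, if_neg (by omega), hx]

lemma pvAexpr_pairwise (n e : Int) (cN : Nat) :
    (pvAexpr n e cN).Pairwise (fun a b => a.2.1 < b.2.1) := by
  rw [pvAexpr_eq, List.pairwise_filterMap]
  apply (PySem.List.pairwise_lt_pyRange_one 1 ((cN : Int) + 1)).imp
  intro a b hab y hy y' hy'
  unfold pvGA at hy hy'
  by_cases ha : (pvHMF e (cN - 1)).getD (pvAcc e a.toNat + n) (-1) = -1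
  · rw [if_pos ha] at hy; exact absurd hy (by simp)
  · by_cases hb : (pvHMF e (cN - 1)).getD (pvAcc e b.toNat + n) (-1) = -1
    · rw [if_pos hb] at hy'; exact absurd hy' (by simp)
    · rw [if_neg ha] at hy
      rw [if_neg hb] at hy'
      obtain rfl := Option.some.injEq .. ▸ hy
      obtain rfl := Option.some.injEq .. ▸ hy'
      exact hab

lemma pvBexpr_spec (n e : Int) (hn : 1 ≤ n) (cN : Nat) (hc : 1 ≤ cN) :
    (∀ x, x ∈ pvBexpr n e cN ↔ pvChar e n cN x) ∧
      (pvBexpr n e cN).Pairwise (fun a b => a.2.1 < b.2.1) := by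
  unfold pvBexpr
  simp only [List.length_map, List.length_range]
  rw [PySem.List.pyRange_one 1 (cN : Int), List.foldl_map]
  have ht : ((cN : Int) - 1).toNat = cN - 1 := by omega
  rw [ht]
  have hfn : (fun (s : List (Int × Int × Int) × Int × Int) (k : Nat) =>
      (fun (s : List (Int × Int × Int) × Int × Int) (r : Int) =>
        let lw := pvShrink n ((List.range cN).map (pvPw e)).toArray cN
          (s.2.1, s.2.2 + pvIx ((List.range cN).map (pvPw e)).toArray r)
        (if lw.2 = n then s.1 ++ [(e, lw.1, r)] else s.1, lw)) s (1 + (k : Int)))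
      = pvBStep n e cN := by
    funext s k
    rfl
  rw [hfn]
  obtain ⟨ans, L, hfold, _, _, _, _, hmem, hpw⟩ := bloop n e hn cN (cN - 1) (by omega)
  rw [hfold]
  refine ⟨?_, hpw⟩
  intro x
  rw [hmem x]
  constructor
  · rintro ⟨L', R', hx, h1, h2, h3, h4⟩
    exact ⟨L', R', hx, h1, h2, by omega, h4⟩
  · rintro ⟨L', R', hx, h1, h2, h3, h4⟩
    exact ⟨L', R', hx, h1, h2, by omega, h4⟩
-- ===== VERDICT (by name: the statement is the Claim_ definition above) =====
theorem solve_e_spec : Claim_equal_solve_e := by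
  intro n e _ hpre
  unfold Spec_solve_e
  by_cases hg : pvGuard n e = true
  · simp only [solve_e, solve_e_alt, if_pos hg]
  · have he : 0 ≤ e := by
      by_contra h
      apply hg
      unfold pvGuard
      rw [if_neg h]
      rcases hpre with h' | h'
      · omega
      · simp [h']
    have hn1 : 1 + 2 ^ e.toNat ≤ n := by
      by_contra h
      apply hg
      unfold pvGuard
      rw [if_pos he]
      simp
      omega
    have h2p : (1 : Int) ≤ 2 ^ e.toNat := one_le_pow₀ (by norm_num)
    have hn : 1 ≤ n := by omega
    obtain ⟨cN, hP, hbound⟩ := pvPowerLoop_shape n e ((n + 1).toNat) 0 []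
    rw [Nat.cast_zero, ← List.range_eq_range', List.reverse_nil, List.nil_append] at hP
    have hc1 : 1 ≤ cN := by
      by_contra h
      have hm0 : cN = 0 := by omega
      subst hm0
      have hlt := hbound (by omega)
      have hle : pvPw e (0 + 0) ≤ 1 := by
        rcases Nat.eq_zero_or_pos e.toNat with h' | h'
        · simp [pvPw, h']
        · simp [pvPw, zero_pow (by omega : e.toNat ≠ 0)]
      omega
    have hA : solve_e n e = pvAexpr n e cN := by
      simp only [solve_e, pvAexpr]
      rw [if_neg hg, hP]
    have hB : solve_e_alt n e = pvBexpr n e cN := by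
      simp only [solve_e_alt, pvBexpr]
      rw [if_neg hg, hP]
    obtain ⟨hmemB, hpwB⟩ := pvBexpr_spec n e hn cN hc1
    have hmemA := pvAexpr_mem n e hn cN
    have hpwA := pvAexpr_pairwise n e cN
    have hndA : (pvAexpr n e cN).Nodup :=
      hpwA.imp (fun h heq => by subst heq; exact lt_irrefl _ h)
    have hndB : (pvBexpr n e cN).Nodup :=
      hpwB.imp (fun h heq => by subst heq; exact lt_irrefl _ h)
    have hperm : (pvBexpr n e cN).Perm (pvAexpr n e cN) :=
      (List.perm_ext_iff_of_nodup hndB hndA).mpr (fun x => (hmemB x).trans (hmemA x).symm)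
    have h1 := PySem.List.sorted_eq_of_perm_of_pairwise_lt (pvAexpr n e cN) (pvBexpr n e cN)
      (fun x => x.2.1) hperm hpwB
    have h2 := PySem.List.sorted_eq_of_perm_of_pairwise_lt (pvAexpr n e cN) (pvAexpr n e cN)
      (fun x => x.2.1) (List.Perm.refl _) hpwA
    rw [hA, hB, ← h1]
    exact h2.symm
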